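-- pv_equiv track=rewrite | github.com/Toasa/go_test | quine/LZ.py | gen_location_dict
-- ===== SOURCE A (Python) =====
-- def gen_location_dict(input):
--     pos = 0
--     locate_dict = {}
--     bytes_seq = []
--     dict_val = 1
--
--     while 1:
--         pos_from = pos
--         pos_to = pos + 1
--         while input[pos_from:pos_to] in locate_dict.keys():
--             pos_to += 1
--         new_bytes = input[pos_from:pos_to]
--         bytes_seq.append(new_bytes)
--         locate_dict[new_bytes] = format(dict_val, '03b')
--         dict_val += 1
--         pos = pos_to
--         if pos >= len(input):
--             break
--     return locate_dict, bytes_seq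
-- ===== SOURCE B (Python) =====
-- def gen_location_dict(input):
--     # Trie-based LZ78 parser: walks one char at a time instead of re-slicing
--     # and re-hashing growing prefixes.  Ids double as phrase numbers.
--     trie = {}            # (node_id, char) -> node_id; 0 is the root
--     locate_dict = {}
--     bytes_seq = []
--     i = 0
--     n = len(input)
--     next_id = 1
--     while i < n:
--         node = 0
--         j = i
--         while j < n and (node, input[j]) in trie:
--             node = trie[(node, input[j])]
--             j += 1
--         new = input[i:j + 1]
--         if j < n:
--             trie[(node, input[j])] = next_id
--         bytes_seq.append(new)
--         locate_dict[new] = format(next_id, '03b')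
--         next_id += 1
--         i = j + 1
--     return locate_dict, bytes_seq
-- ===== Notes on version B (the rewrite author's own statement) =====
-- stated objective: alternative
-- what changed: B replaces A's repeated slice-and-hash dictionary probes (rebuilding and hashing every growing prefix at each step) with a trie keyed by (node,char) walked one character at a time, assigning phrase ids in the same order.
-- intended difference: On the empty string A emits a spurious empty phrase and returns ({'': '001'}, ['']) — an artefact of its do-while structure — while B returns the intended empty parse ({}, []). — e.g. on gen_location_dict(""): A returns ([("", "001")], [""]), B returns ([], [])
import Mathlib
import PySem

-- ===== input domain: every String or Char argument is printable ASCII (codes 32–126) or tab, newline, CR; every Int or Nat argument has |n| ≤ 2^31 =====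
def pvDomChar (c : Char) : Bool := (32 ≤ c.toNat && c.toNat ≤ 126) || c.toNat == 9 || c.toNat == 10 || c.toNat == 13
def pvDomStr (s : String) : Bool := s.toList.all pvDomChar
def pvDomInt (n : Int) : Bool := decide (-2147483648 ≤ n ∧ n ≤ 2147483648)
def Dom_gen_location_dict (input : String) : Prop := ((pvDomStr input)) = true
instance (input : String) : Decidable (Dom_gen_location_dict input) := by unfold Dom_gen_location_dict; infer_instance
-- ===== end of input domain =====

-- B replaces A's repeated slice-and-hash dictionary probes with a trie walked one
-- character at a time (a different algorithm, same observable results); on the empty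
-- string A's spurious empty phrase is an artefact and B returns the empty parse
-- instead (see D_ below).

-- format(v, '03b') for v ≥ 0: binary digits zero-padded to width 3 (used by both programs)
def binFmt (v : Nat) : String := String.ofList (PySem.Chars.zfill (Nat.toDigits 2 v) 3)

-- ===== PORT A =====
-- inner `while input[pos_from:pos_to] in locate_dict.keys(): pos_to += 1`
-- (slice input[a:b] with 0 ≤ a ≤ b is (drop a).take (b-a), exact; the fuel passed by
-- aLoop is enough on every input where the Python loop terminates, i.e. inside Pre_)
def aInner (cs : List Char) (d : PySem.Dict String String) (pos_from : Nat) : Nat → Nat → Nat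
  | 0, pos_to => pos_to
  | fuel + 1, pos_to =>
      if d.contains (String.ofList ((cs.drop pos_from).take (pos_to - pos_from))) then
        aInner cs d pos_from fuel (pos_to + 1)
      else pos_to

-- outer `while 1: … if pos >= len(input): break` (one fuel unit per phrase; pos grows
-- by ≥ 1 per phrase, so the fuel passed below never runs out when the Python returns)
def aLoop (cs : List Char) : Nat → Nat → PySem.Dict String String → List String → Nat →
    PySem.Dict String String × List String
  | 0, _pos, d, seq, _v => (d, seq)
  | fuel + 1, pos, d, seq, v =>
      let pos_to := aInner cs d pos (cs.length + 1 - pos) (pos + 1)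
      let nb := String.ofList ((cs.drop pos).take (pos_to - pos))
      let seq' := seq ++ [nb]
      let d' := d.insert nb (binFmt v)
      if cs.length ≤ pos_to then (d', seq')
      else aLoop cs fuel pos_to d' seq' (v + 1)

def gen_location_dict (input : String) : (List (String × String)) × List String :=
  let cs := input.toList
  let r := aLoop cs (cs.length + 1) 0 PySem.Dict.empty [] 1
  (r.1.items, r.2)

-- ===== PORT B =====
-- inner `while j < n and (node, input[j]) in trie: …` — walks the suffix cs.drop i,
-- so the list running out is exactly the `j < n` guard failing
def bWalk (trie : PySem.Dict (Nat × Char) Nat) : List Char → Nat → Nat → Nat × Nat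
  | [], node, j => (node, j)
  | c :: rest, node, j =>
      match trie.get? (node, c) with
      | some node' => bWalk trie rest node' (j + 1)
      | none => (node, j)

-- outer `while i < n:` (i grows by ≥ 1 per iteration, so fuel n + 1 never runs out)
def bLoop (cs : List Char) (n : Nat) : Nat → Nat → PySem.Dict (Nat × Char) Nat →
    PySem.Dict String String → List String → Nat → PySem.Dict String String × List String
  | 0, _i, _trie, ld, seq, _id => (ld, seq)
  | fuel + 1, i, trie, ld, seq, id =>
      if i < n then
        let p := bWalk trie (cs.drop i) 0 i
        let node := p.1
        let j := p.2
        let nw := String.ofList ((cs.drop i).take (j + 1 - i))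
        let trie' := if j < n then trie.insert (node, (cs.drop j).headD ' ') id else trie
        bLoop cs n fuel (j + 1) trie' (ld.insert nw (binFmt id)) (seq ++ [nw]) (id + 1)
      else (ld, seq)

def gen_location_dict_alt (input : String) : (List (String × String)) × List String :=
  let cs := input.toList
  let r := bLoop cs cs.length (cs.length + 1) 0 PySem.Dict.empty PySem.Dict.empty [] 1
  (r.1.items, r.2)

-- ===== PRECONDITION & SPEC =====
-- the shortest prefix length k ≥ 1 of rest that is not yet a phrase (none: every
-- prefix including the whole of rest is a phrase — there A's inner loop never exits)
def shortestNew (seenS : List String) (rest : List Char) : Option Nat :=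
  ((List.range rest.length).map (· + 1)).find?
    (fun k => !(seenS.contains (String.ofList (rest.take k))))

def preAux : Nat → List String → List Char → Bool
  | _, _, [] => true
  | 0, _, _ => false
  | fuel + 1, seenS, rest =>
      match shortestNew seenS rest with
      | none => false
      | some k => preAux fuel (seenS ++ [String.ofList (rest.take k)]) (rest.drop k)

-- Pre_ excludes exactly the inputs on which the Python A never returns (its inner
-- while-loop runs forever as soon as the remaining tail of the input is already a
-- dictionary phrase).  Termination is intrinsically a property of the
-- greedy parse of the input, so it is stated with the small independent parser
-- above (used by neither port); the parse has at most |input| phrases, hence the fuel.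
def Pre_gen_location_dict (input : String) : Prop :=
  preAux (input.toList.length + 1) [] input.toList = true

instance (input : String) : Decidable (Pre_gen_location_dict input) := by
  unfold Pre_gen_location_dict; infer_instance

def pvWitness_gen_location_dict : String := "ab"

-- On the empty string A emits a spurious empty phrase and returns ({'': '001'}, [''])
-- — an artefact of its do-while structure — while B returns the intended empty parse ({}, []).
def D_gen_location_dict (input : String) : Prop := input = ""

instance (input : String) : Decidable (D_gen_location_dict input) := by
  unfold D_gen_location_dict; infer_instance

def Spec_gen_location_dict (input : String) (out : (List (String × String)) × List String) : Prop :=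
  ¬ D_gen_location_dict input → out = gen_location_dict_alt input

instance (input : String) (out : (List (String × String)) × List String) :
    Decidable (Spec_gen_location_dict input out) := by
  unfold Spec_gen_location_dict; infer_instance

def pvDiffWitness_gen_location_dict : String := ""

def pvDiffWitnessOut_gen_location_dict :
    ((List (String × String)) × List String) × ((List (String × String)) × List String) :=
  (([("", "001")], [""]), ([], []))

-- ===== CLAIM (what is proved, stated in full; the proofs are below) =====
def Claim_unchanged_gen_location_dict : Prop := ∀ (input : String),
  Dom_gen_location_dict input → Pre_gen_location_dict input →
  Spec_gen_location_dict input (gen_location_dict input)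

def Claim_changed_gen_location_dict : Prop :=
  Dom_gen_location_dict (pvDiffWitness_gen_location_dict) ∧
  Pre_gen_location_dict (pvDiffWitness_gen_location_dict) ∧
  D_gen_location_dict (pvDiffWitness_gen_location_dict) ∧
  gen_location_dict (pvDiffWitness_gen_location_dict) = pvDiffWitnessOut_gen_location_dict.1 ∧
  gen_location_dict_alt (pvDiffWitness_gen_location_dict) = pvDiffWitnessOut_gen_location_dict.2 ∧
  pvDiffWitnessOut_gen_location_dict.1 ≠ pvDiffWitnessOut_gen_location_dict.2

def Claim_exact_gen_location_dict : Prop := ∀ (input : String),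
  Dom_gen_location_dict input → Pre_gen_location_dict input → D_gen_location_dict input →
  gen_location_dict input ≠ gen_location_dict_alt input

-- ===== LEMMAS AND PROOFS =====

-- the phrase list both loops build; trie/dict/output are functions of it
def GoodSeen (seen : List (List Char)) : Prop :=
  seen.Nodup ∧ (∀ p ∈ seen, p ≠ []) ∧ (∀ p ∈ seen, p.dropLast = [] ∨ p.dropLast ∈ seen)

-- node id of a matched word: 0 for the root, 1-based phrase index otherwise
def nid (seen : List (List Char)) (w : List Char) : Nat :=
  if w = [] then 0 else seen.idxOf w + 1

def mkItems (seen : List (List Char)) : List (String × String) :=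
  seen.zipIdx.map (fun pi => (String.ofList pi.1, binFmt (pi.2 + 1)))

def mkD (seen : List (List Char)) : PySem.Dict String String := PySem.Dict.mk (mkItems seen)

def mkSeq (seen : List (List Char)) : List String := seen.map String.ofList

-- the key of a phrase in the trie
def keyf (seen : List (List Char)) (p : List Char) : Nat × Char :=
  (nid seen p.dropLast, p.getLastD ' ')

def mkTItems (seen : List (List Char)) : List ((Nat × Char) × Nat) :=
  seen.zipIdx.map (fun pi => (keyf seen pi.1, pi.2 + 1))

def mkT (seen : List (List Char)) : PySem.Dict (Nat × Char) Nat := PySem.Dict.mk (mkTItems seen)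

theorem ofList_inj {a b : List Char} (h : String.ofList a = String.ofList b) : a = b := by
  have := congrArg String.toList h
  simpa using this

theorem mem_mkSeq {seen : List (List Char)} {w : List Char} :
    String.ofList w ∈ mkSeq seen ↔ w ∈ seen := by
  unfold mkSeq
  constructor
  · intro h
    obtain ⟨q, hq, he⟩ := List.mem_map.1 h
    rwa [← ofList_inj he]
  · exact fun h => List.mem_map_of_mem h

theorem take_succ_eq {l : List Char} {i : Nat} (h : i < l.length) :
    l.take (i + 1) = l.take i ++ [l[i]] := by
  rw [List.take_add_one, List.getElem?_eq_getElem h]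
  rfl

theorem keys_mkD (seen : List (List Char)) : (mkD seen).keys = mkSeq seen := by
  show (mkItems seen).map Prod.fst = mkSeq seen
  unfold mkItems mkSeq
  rw [List.map_map,
    show (Prod.fst ∘ fun pi : List Char × Nat => (String.ofList pi.1, binFmt (pi.2 + 1)))
      = (String.ofList ∘ Prod.fst) from rfl,
    ← List.map_map, List.zipIdx_map_fst]

theorem contains_mkD (seen : List (List Char)) (w : List Char) :
    (mkD seen).contains (String.ofList w) = decide (w ∈ seen) := by
  rw [PySem.Dict.contains_eq_decide_mem_keys, keys_mkD]
  simp [mem_mkSeq]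

theorem nid_inj {seen : List (List Char)} (_hnd : seen.Nodup) (hne : ∀ p ∈ seen, p ≠ [])
    {w w' : List Char} (hw : w = [] ∨ w ∈ seen) (hw' : w' = [] ∨ w' ∈ seen)
    (h : nid seen w = nid seen w') : w = w' := by
  unfold nid at h
  rcases hw with rfl | hw
  · rcases hw' with rfl | hw'
    · rfl
    · rw [if_pos rfl, if_neg (hne w' hw')] at h
      exact absurd h (by omega)
  · rcases hw' with rfl | hw'
    · rw [if_neg (hne w hw), if_pos rfl] at h
      exact absurd h (by omega)
    · rw [if_neg (hne w hw), if_neg (hne w' hw')] at h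
      have h1 : seen.idxOf w < seen.length := List.idxOf_lt_length_of_mem hw
      have h2 : seen.idxOf w' < seen.length := List.idxOf_lt_length_of_mem hw'
      have h' : seen.idxOf w = seen.idxOf w' := by omega
      calc w = seen[seen.idxOf w] := (List.getElem_idxOf h1).symm
        _ = seen[seen.idxOf w'] := by congr 1
        _ = w' := List.getElem_idxOf h2

theorem dropLast_concat_getLastD {p : List Char} (h : p ≠ []) :
    p.dropLast ++ [p.getLastD ' '] = p := by
  have := List.dropLast_concat_getLast h
  rwa [List.getLastD_eq_getLast?, List.getLast?_eq_some_getLast h]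

theorem keyf_inj {seen : List (List Char)} (hg : GoodSeen seen) :
    ∀ p ∈ seen, ∀ q ∈ seen, keyf seen p = keyf seen q → p = q := by
  obtain ⟨hnd, hne, hpc⟩ := hg
  intro p hp q hq h
  unfold keyf at h
  have h1 : p.dropLast = q.dropLast :=
    nid_inj hnd hne (hpc p hp) (hpc q hq) (congrArg Prod.fst h)
  have h2 : p.getLastD ' ' = q.getLastD ' ' := congrArg Prod.snd h
  rw [← dropLast_concat_getLastD (hne p hp), ← dropLast_concat_getLastD (hne q hq), h1, h2]

theorem keys_mkT (seen : List (List Char)) : (mkT seen).keys = seen.map (keyf seen) := by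
  show (mkTItems seen).map Prod.fst = _
  unfold mkTItems
  rw [List.map_map,
    show (Prod.fst ∘ fun pi : List Char × Nat => (keyf seen pi.1, pi.2 + 1))
      = (keyf seen ∘ Prod.fst) from rfl,
    ← List.map_map, List.zipIdx_map_fst]

theorem keys_mkT_nodup {seen : List (List Char)} (hg : GoodSeen seen) : (mkT seen).keys.Nodup := by
  rw [keys_mkT]
  exact List.Nodup.map_on (keyf_inj hg) hg.1

theorem mkT_get?_mem {seen : List (List Char)} (hg : GoodSeen seen) {q : List Char}
    (hq : q ∈ seen) :
    (mkT seen).get? (keyf seen q) = some (seen.idxOf q + 1) := by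
  apply PySem.Dict.get?_of_mem_items _ _ (keys_mkT_nodup hg)
  show _ ∈ mkTItems seen
  unfold mkTItems
  have hlt : seen.idxOf q < seen.length := List.idxOf_lt_length_of_mem hq
  have hmem : (q, seen.idxOf q) ∈ seen.zipIdx := by
    rw [List.mem_zipIdx_iff_getElem?]
    simp [List.getElem?_eq_getElem hlt, List.getElem_idxOf hlt]
  exact List.mem_map.2 ⟨(q, seen.idxOf q), hmem, rfl⟩

theorem mkT_get?_none {seen : List (List Char)} (hg : GoodSeen seen) {w : List Char} {c : Char}
    (hw : w = [] ∨ w ∈ seen) (hnotin : w ++ [c] ∉ seen) :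
    (mkT seen).get? (nid seen w, c) = none := by
  rw [PySem.Dict.get?_eq_none_iff_not_mem_keys, keys_mkT]
  intro hmem
  obtain ⟨p, hp, he⟩ := List.mem_map.1 hmem
  obtain ⟨hnd, hne, hpc⟩ := hg
  unfold keyf at he
  have h1 : p.dropLast = w :=
    nid_inj hnd hne (hpc p hp) hw (congrArg Prod.fst he)
  have h2 : p.getLastD ' ' = c := congrArg Prod.snd he
  apply hnotin
  rw [← h1, ← h2, dropLast_concat_getLastD (hne p hp)]
  exact hp

theorem mkT_get? {seen : List (List Char)} (hg : GoodSeen seen) {w : List Char} (c : Char)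
    (hw : w = [] ∨ w ∈ seen) :
    (mkT seen).get? (nid seen w, c) =
      if w ++ [c] ∈ seen then some (seen.idxOf (w ++ [c]) + 1) else none := by
  split
  · next hin =>
    have hk : keyf seen (w ++ [c]) = (nid seen w, c) := by
      unfold keyf
      rw [List.dropLast_concat, List.getLastD_concat]
    rw [← hk]
    exact mkT_get?_mem hg hin
  · next hnotin => exact mkT_get?_none hg hw hnotin

theorem bWalk_spec {seen : List (List Char)} (hg : GoodSeen seen) (rest : List Char)
    (k0 i : Nat) (hk01 : 1 ≤ k0) (hk0len : k0 ≤ rest.length)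
    (hmem : ∀ j, 1 ≤ j → j < k0 → rest.take j ∈ seen)
    (hnot : rest.take k0 ∉ seen) :
    ∀ dd m, k0 - 1 - m = dd → m < k0 →
      bWalk (mkT seen) (rest.drop m) (nid seen (rest.take m)) (i + m)
        = (nid seen (rest.take (k0 - 1)), i + (k0 - 1)) := by
  intro dd
  induction dd with
  | zero =>
    intro m hdd hm
    have hmk : m = k0 - 1 := by omega
    subst hmk
    have hlt : k0 - 1 < rest.length := by omega
    have hwok : rest.take (k0 - 1) = [] ∨ rest.take (k0 - 1) ∈ seen := by
      by_cases h1 : k0 = 1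
      · left; simp [h1]
      · right; exact hmem (k0 - 1) (by omega) (by omega)
    rw [List.drop_eq_getElem_cons hlt]
    simp only [bWalk]
    rw [mkT_get? hg _ hwok, ← take_succ_eq hlt,
      show k0 - 1 + 1 = k0 by omega, if_neg hnot]
  | succ dd ihd =>
    intro m hdd hm
    have hmlt : m + 1 < k0 := by omega
    have hlt : m < rest.length := by omega
    have hwok : rest.take m = [] ∨ rest.take m ∈ seen := by
      by_cases h1 : m = 0
      · left; simp [h1]
      · right; exact hmem m (by omega) (by omega)
    rw [List.drop_eq_getElem_cons hlt]
    simp only [bWalk]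
    rw [mkT_get? hg _ hwok, ← take_succ_eq hlt]
    have hin : rest.take (m + 1) ∈ seen := hmem (m + 1) (by omega) hmlt
    rw [if_pos hin]
    have hnid : seen.idxOf (rest.take (m + 1)) + 1 = nid seen (rest.take (m + 1)) := by
      unfold nid
      rw [if_neg (hg.2.1 _ hin)]
    rw [hnid, show i + m + 1 = i + (m + 1) by omega]
    exact ihd (m + 1) (by omega) hmlt

theorem aInner_spec (cs : List Char) (seen : List (List Char)) (pos k0 : Nat)
    (hmem : ∀ j, 1 ≤ j → j < k0 → (cs.drop pos).take j ∈ seen)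
    (hnot : (cs.drop pos).take k0 ∉ seen) :
    ∀ fuel k, 1 ≤ k → k ≤ k0 → k0 - k < fuel →
      aInner cs (mkD seen) pos fuel (pos + k) = pos + k0 := by
  intro fuel
  induction fuel with
  | zero => intro k _ _ h; omega
  | succ fuel ih =>
    intro k hk1 hkk0 hfuel
    simp only [aInner]
    rw [show pos + k - pos = k by omega, contains_mkD]
    by_cases hlt : k < k0
    · rw [decide_eq_true (hmem k hk1 hlt)]
      simp only [if_true]
      rw [show pos + k + 1 = pos + (k + 1) by omega]
      exact ih (k + 1) (by omega) (by omega) (by omega)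
    · have hk : k = k0 := by omega
      subst hk
      rw [decide_eq_false hnot]
      simp

theorem shortestNew_spec {seenS : List String} {rest : List Char} {k0 : Nat}
    (h : shortestNew seenS rest = some k0) :
    1 ≤ k0 ∧ k0 ≤ rest.length ∧
    (∀ j, 1 ≤ j → j < k0 → String.ofList (rest.take j) ∈ seenS) ∧
    String.ofList (rest.take k0) ∉ seenS := by
  unfold shortestNew at h
  rw [List.find?_eq_some_iff_append] at h
  obtain ⟨hpred, as, bs, heq, hprev⟩ := h
  have hlen : ((List.range rest.length).map (· + 1)).length = rest.length := by simp
  have hasl : as.length < rest.length := by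
    have := congrArg List.length heq
    simp at this
    omega
  have hk0 : k0 = as.length + 1 := by
    have hi1 : as.length < ((List.range rest.length).map (· + 1)).length := by omega
    have e1 := List.getElem_of_eq heq hi1
    rw [List.getElem_append_right (le_refl as.length)] at e1
    simp at e1
    omega
  refine ⟨by omega, by omega, ?_, ?_⟩
  · intro j hj1 hjk
    have hjlt : j - 1 < as.length := by omega
    have hi2 : j - 1 < ((List.range rest.length).map (· + 1)).length := by omega
    have e2 := List.getElem_of_eq heq hi2
    rw [List.getElem_append_left hjlt] at e2
    simp at e2
    have hjv : as[j - 1]'hjlt = j := by omega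
    have hmemas : j ∈ as := hjv ▸ List.getElem_mem hjlt
    have := hprev j hmemas
    simpa using this
  · simpa using hpred

theorem mkSeq_append (seen : List (List Char)) (p : List Char) :
    mkSeq (seen ++ [p]) = mkSeq seen ++ [String.ofList p] := by
  simp [mkSeq]

theorem mkD_append (seen : List (List Char)) (p : List Char) (hnp : p ∉ seen) :
    mkD (seen ++ [p]) = (mkD seen).insert (String.ofList p) (binFmt (seen.length + 1)) := by
  apply PySem.Dict.ext
  rw [PySem.Dict.items_insert_of_not_contains]
  · show mkItems (seen ++ [p]) = mkItems seen ++ [_]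
    unfold mkItems
    rw [List.zipIdx_append, List.map_append]
    congr 1
    simp [List.zipIdx]
  · rw [contains_mkD]
    simp [hnp]

theorem nid_append {seen : List (List Char)} (p : List Char) {q : List Char}
    (hq : q = [] ∨ q ∈ seen) : nid (seen ++ [p]) q = nid seen q := by
  unfold nid
  by_cases hqe : q = []
  · simp [hqe]
  · rcases hq with rfl | hq
    · simp at hqe
    · rw [if_neg hqe, if_neg hqe, List.idxOf_append, if_pos hq]

theorem mkT_append {seen : List (List Char)} (hg : GoodSeen seen) {p : List Char}
    (hnp : p ∉ seen) (hpne : p ≠ []) (hpd : p.dropLast = [] ∨ p.dropLast ∈ seen) :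
    mkT (seen ++ [p])
      = (mkT seen).insert (nid seen p.dropLast, p.getLastD ' ') (seen.length + 1) := by
  apply PySem.Dict.ext
  rw [PySem.Dict.items_insert_of_not_contains]
  · show mkTItems (seen ++ [p]) = mkTItems seen ++ [_]
    unfold mkTItems
    rw [List.zipIdx_append, List.map_append]
    congr 1
    · apply List.map_congr_left
      intro pi hpi
      have hq : pi.1 ∈ seen := by
        obtain ⟨_, _, h⟩ := List.mem_zipIdx hpi
        exact h ▸ List.getElem_mem _
      unfold keyf
      rw [nid_append p (hg.2.2 pi.1 hq)]
    · simp [List.zipIdx, keyf]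
      rw [nid_append p hpd]
  · rw [PySem.Dict.contains_eq_isSome_get?, mkT_get?_none hg hpd]
    · rfl
    · rwa [dropLast_concat_getLastD hpne]

theorem GoodSeen_append {seen : List (List Char)} {p : List Char} (hg : GoodSeen seen)
    (hnp : p ∉ seen) (hpne : p ≠ []) (hpd : p.dropLast = [] ∨ p.dropLast ∈ seen) :
    GoodSeen (seen ++ [p]) := by
  obtain ⟨hnd, hne, hpc⟩ := hg
  refine ⟨?_, ?_, ?_⟩
  · simp [List.nodup_append, hnd]
    exact fun a ha h => hnp (h ▸ ha)
  · intro q hq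
    rcases List.mem_append.1 hq with h | h
    · exact hne q h
    · simp at h; subst h; exact hpne
  · intro q hq
    rcases List.mem_append.1 hq with h | h
    · rcases hpc q h with h' | h'
      · exact Or.inl h'
      · exact Or.inr (List.mem_append_left _ h')
    · simp at h; subst h
      rcases hpd with h' | h'
      · exact Or.inl h'
      · exact Or.inr (List.mem_append_left _ h')

theorem bLoop_stop (cs : List Char) (n g i : Nat) (trie : PySem.Dict (Nat × Char) Nat)
    (ld : PySem.Dict String String) (seq : List String) (id : Nat) (h : n ≤ i) :
    bLoop cs n g i trie ld seq id = (ld, seq) := by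
  cases g with
  | zero => rfl
  | succ g =>
    simp only [bLoop]
    rw [if_neg (by omega)]

theorem loop_eq (cs : List Char) :
    ∀ (g : Nat) (seen : List (List Char)) (pos : Nat),
      GoodSeen seen → pos < cs.length →
      preAux g (mkSeq seen) (cs.drop pos) = true →
      aLoop cs g pos (mkD seen) (mkSeq seen) (seen.length + 1)
        = bLoop cs cs.length g pos (mkT seen) (mkD seen) (mkSeq seen) (seen.length + 1) := by
  intro g
  induction g with
  | zero =>
    intro seen pos hg hpos hpre
    rw [List.drop_eq_getElem_cons hpos] at hpre
    simp [preAux] at hpre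
  | succ g ih =>
    intro seen pos hg hpos hpre
    have hrest : cs.drop pos = cs[pos] :: cs.drop (pos + 1) := List.drop_eq_getElem_cons hpos
    rw [hrest] at hpre
    simp only [preAux] at hpre
    cases hsn : shortestNew (mkSeq seen) (cs[pos] :: cs.drop (pos + 1)) with
    | none => rw [hsn] at hpre; simp at hpre
    | some k0 =>
      rw [hsn] at hpre
      rw [← hrest] at hsn hpre
      obtain ⟨hk01, hk0len, hmemS, hnotS⟩ := shortestNew_spec hsn
      have hrlen : (cs.drop pos).length = cs.length - pos := List.length_drop
      rw [hrlen] at hk0len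
      have hmem : ∀ j, 1 ≤ j → j < k0 → (cs.drop pos).take j ∈ seen :=
        fun j h1 h2 => mem_mkSeq.1 (hmemS j h1 h2)
      have hnot : (cs.drop pos).take k0 ∉ seen := fun h => hnotS (mem_mkSeq.2 h)
      have hplen : ((cs.drop pos).take k0).length = k0 := by
        rw [List.length_take]; omega
      have hpne : (cs.drop pos).take k0 ≠ [] := by
        intro h; rw [h] at hplen; simp at hplen; omega
      have hk1lt : k0 - 1 < (cs.drop pos).length := by rw [hrlen]; omega
      have hsplit : (cs.drop pos).take k0
          = (cs.drop pos).take (k0 - 1) ++ [(cs.drop pos)[k0 - 1]'hk1lt] := by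
        rw [← take_succ_eq hk1lt, show k0 - 1 + 1 = k0 by omega]
      have hpd : ((cs.drop pos).take k0).dropLast = (cs.drop pos).take (k0 - 1) := by
        rw [hsplit, List.dropLast_concat]
      have hpl : ((cs.drop pos).take k0).getLastD ' ' = (cs.drop pos)[k0 - 1]'hk1lt := by
        rw [hsplit, List.getLastD_concat]
      have hpdok : ((cs.drop pos).take k0).dropLast = []
          ∨ ((cs.drop pos).take k0).dropLast ∈ seen := by
        rw [hpd]
        by_cases h1 : k0 = 1
        · left; simp [h1]
        · right; exact hmem (k0 - 1) (by omega) (by omega)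
      have hA : aInner cs (mkD seen) pos (cs.length + 1 - pos) (pos + 1) = pos + k0 :=
        aInner_spec cs seen pos k0 hmem hnot _ 1 (le_refl 1) hk01 (by omega)
      have hB : bWalk (mkT seen) (cs.drop pos) 0 pos
          = (nid seen ((cs.drop pos).take (k0 - 1)), pos + (k0 - 1)) := by
        have h0 : nid seen ((cs.drop pos).take 0) = 0 := by simp [nid]
        have := bWalk_spec hg (cs.drop pos) k0 pos hk01 (by omega) hmem hnot (k0 - 1 - 0) 0
          rfl (by omega)
        simpa [h0] using this
      simp only [aLoop, bLoop]
      rw [hA, if_pos hpos, hB]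
      simp only []
      rw [show pos + k0 - pos = k0 by omega,
        show pos + (k0 - 1) + 1 - pos = k0 by omega]
      have hjlt : pos + (k0 - 1) < cs.length := by omega
      rw [if_pos hjlt]
      have hhead : (cs.drop (pos + (k0 - 1))).headD ' ' = (cs.drop pos)[k0 - 1]'hk1lt := by
        rw [show pos + (k0 - 1) = pos + (k0 - 1) by rfl, ← List.drop_drop,
          List.drop_eq_getElem_cons hk1lt]
        rfl
      rw [hhead, ← hpl, ← hpd,
        ← mkT_append hg hnot hpne hpdok,
        ← mkD_append seen _ hnot,
        ← mkSeq_append seen _,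
        show seen.length + 1 + 1 = (seen ++ [(cs.drop pos).take k0]).length + 1 by simp,
        show pos + (k0 - 1) + 1 = pos + k0 by omega]
      have hg' : GoodSeen (seen ++ [(cs.drop pos).take k0]) :=
        GoodSeen_append hg hnot hpne hpdok
      by_cases hend : cs.length ≤ pos + k0
      · rw [if_pos hend, bLoop_stop cs cs.length g (pos + k0) _ _ _ _ hend]
      · rw [if_neg hend]
        apply ih _ (pos + k0) hg' (by omega)
        rw [mkSeq_append]
        have hdd : (cs.drop pos).drop k0 = cs.drop (pos + k0) := List.drop_drop
        rw [← hdd]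
        exact hpre

-- ===== VERDICT (by name: the statement is the Claim_ definition above) =====
theorem gen_location_dict_spec : Claim_unchanged_gen_location_dict := by
  intro input _hdom hpre hnd
  have hne : input.toList ≠ [] := by
    intro h
    exact hnd (String.toList_eq_nil_iff.1 h)
  have h0 : 0 < input.toList.length := by
    cases h : input.toList with
    | nil => exact absurd h hne
    | cons a l => simp
  show gen_location_dict input = gen_location_dict_alt input
  unfold gen_location_dict gen_location_dict_alt
  simp only []
  unfold Pre_gen_location_dict at hpre
  have hmain := loop_eq input.toList (input.toList.length + 1) [] 0
    ⟨List.nodup_nil, by simp, by simp⟩ h0 (by rw [List.drop_zero]; exact hpre)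
  simp only [List.length_nil, Nat.zero_add] at hmain
  rw [show (PySem.Dict.empty : PySem.Dict String String) = mkD [] from rfl,
    show (PySem.Dict.empty : PySem.Dict (Nat × Char) Nat) = mkT [] from rfl,
    show ([] : List String) = mkSeq [] from rfl]
  rw [hmain]

theorem gen_location_dict_changed : Claim_changed_gen_location_dict := by
  unfold Claim_changed_gen_location_dict; decide

theorem gen_location_dict_tight : Claim_exact_gen_location_dict := by
  intro input _ _ hD
  unfold D_gen_location_dict at hD
  subst hD
  decide
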